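-- pv_equiv track=rewrite | github.com/dariusnguyen/algorithm_data_structure_replit | dp/strings.py | all_construct_recur
-- ===== SOURCE A (Python) =====
-- def all_construct_recur(target, arr):
-- 	if target=='':
-- 		return [[]]
-- 	res = []
-- 	for sub in arr:
-- 		if sub == target[:len(sub)]:
-- 			construct = all_construct_recur(target[len(sub):], arr)
-- 			if construct is not None:
-- 				for c in construct:
-- 					c.append(sub)
-- 				res += construct
-- 	return res
-- ===== SOURCE B (Python) =====
-- def all_construct_recur(target, arr):
--     n = len(target)
--     memo = {}
--
--     def go(i):
--         if i == n:
--             return [[]]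
--         if i in memo:
--             return memo[i]
--         res = []
--         for sub in arr:
--             L = len(sub)
--             if L > 0 and target.startswith(sub, i):
--                 res += [c + [sub] for c in go(i + L)]
--         memo[i] = res
--         return res
--
--     return go(0)
-- ===== Notes on version B (the rewrite author's own statement) =====
-- stated objective: alternative
-- what changed: Replaces the plain top-down recursion by top-down dynamic programming: a memo table keyed by suffix start position, so each suffix's segmentation list is computed once (and combined by copying) instead of being recomputed for every path reaching it.
import Mathlib
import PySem

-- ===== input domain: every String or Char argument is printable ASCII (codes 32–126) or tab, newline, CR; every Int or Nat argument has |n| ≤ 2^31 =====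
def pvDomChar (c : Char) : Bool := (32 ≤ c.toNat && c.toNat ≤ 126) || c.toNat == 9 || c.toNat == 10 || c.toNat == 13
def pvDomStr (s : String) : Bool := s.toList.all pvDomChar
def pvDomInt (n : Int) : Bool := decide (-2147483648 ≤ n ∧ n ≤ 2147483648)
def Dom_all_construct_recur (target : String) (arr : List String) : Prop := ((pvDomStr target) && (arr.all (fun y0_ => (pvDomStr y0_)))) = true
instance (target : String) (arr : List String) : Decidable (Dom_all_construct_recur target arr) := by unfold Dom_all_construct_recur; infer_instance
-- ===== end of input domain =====

-- B adds a memo table keyed by the suffix start position, so each suffix's segmentation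
-- list is computed once instead of once per path; equivalence is proved on the inputs
-- where A terminates. (A mutates only lists it freshly created; the claim is about the
-- return value.)

-- ===== PORT A =====
-- A's recursion does not terminate when '' ∈ arr and target ≠ '' (Python: RecursionError),
-- so the port carries a fuel counter; inside Pre_ the fuel target.length+1 is never exhausted.
def goA (arr : List String) : Nat → List Char → List (List String)
  | 0, _ => []
  | fuel+1, t =>
    if t = [] then [[]]
    else
      arr.foldl (fun res sub =>
        if sub.toList = t.take sub.toList.length then
          res ++ (goA arr fuel (t.drop sub.toList.length)).map (fun c => c ++ [sub])
        else res) []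

def all_construct_recur (target : String) (arr : List String) : List (List String) :=
  goA arr (target.toList.length + 1) target.toList

-- ===== PORT B =====
-- go(i) with the memo dict threaded through; 'target.startswith(sub, i)' is
-- 'sub.toList <+: t.drop i', ported with PySem.Chars.startswith on the dropped suffix
-- (exact for any strings); fuel as in port A (never exhausted inside Pre_).
def goM (t : List Char) (arr : List String) :
    Nat → Nat → PySem.Dict Nat (List (List String)) →
    (List (List String)) × PySem.Dict Nat (List (List String))
  | 0, _, memo => ([], memo)
  | fuel+1, i, memo =>
    if i = t.length then ([[]], memo)
    else
      match memo.get? i with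
      | some v => (v, memo)
      | none =>
        let p := arr.foldl
          (fun (acc : (List (List String)) × PySem.Dict Nat (List (List String))) sub =>
            if 0 < sub.toList.length ∧ PySem.Chars.startswith (t.drop i) sub.toList = true then
              let r := goM t arr fuel (i + sub.toList.length) acc.2
              (acc.1 ++ r.1.map (fun c => c ++ [sub]), r.2)
            else acc) ([], memo)
        (p.1, p.2.insert i p.1)

def all_construct_recur_alt (target : String) (arr : List String) : List (List String) :=
  (goM target.toList arr (target.toList.length + 1) 0 PySem.Dict.empty).1

-- ===== PRECONDITION & SPEC =====
-- Pre_ excludes exactly the inputs where A never returns: a nonempty target with '' ∈ arr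
-- makes A recurse forever on the same target (Python raises RecursionError).
def Pre_all_construct_recur (target : String) (arr : List String) : Prop :=
  target = "" ∨ "" ∉ arr
instance (target : String) (arr : List String) : Decidable (Pre_all_construct_recur target arr) := by
  unfold Pre_all_construct_recur; infer_instance

def pvWitness_all_construct_recur : String × List String :=
  ("purple", ["purp", "p", "ur", "le", "purpl"])

def Spec_all_construct_recur (target : String) (arr : List String) (out : List (List String)) : Prop :=
  out = all_construct_recur_alt target arr
instance (target : String) (arr : List String) (out : List (List String)) : Decidable (Spec_all_construct_recur target arr out) := by unfold Spec_all_construct_recur; infer_instance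

-- ===== CLAIM (what is proved, stated in full; the proofs are below) =====
def Claim_equal_all_construct_recur : Prop := ∀ (target : String) (arr : List String), Dom_all_construct_recur target arr → Pre_all_construct_recur target arr → Spec_all_construct_recur target arr (all_construct_recur target arr)

-- ===== LEMMAS AND PROOFS =====

lemma toList_ne_nil {s : String} (h : s ≠ "") : s.toList ≠ [] := by
  intro hn; apply h; cases s; simp_all

-- fuel irrelevance for goA when '' ∉ arr
lemma goA_fuel (arr : List String) (h : "" ∉ arr) :
    ∀ N t f1 f2, List.length t ≤ N → List.length t < f1 → List.length t < f2 →
      goA arr f1 t = goA arr f2 t := by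
  intro N
  induction N with
  | zero =>
    intro t f1 f2 hN h1 h2
    have ht : t = [] := List.eq_nil_of_length_eq_zero (Nat.le_zero.mp hN)
    match f1, f2, h1, h2 with
    | a+1, b+1, _, _ => simp [goA, ht]
  | succ N ih =>
    intro t f1 f2 hN h1 h2
    match f1, f2, h1, h2 with
    | a+1, b+1, h1, h2 =>
      by_cases ht : t = []
      · simp [goA, ht]
      · simp only [goA, if_neg ht]
        apply PySem.List.foldl_congr_mem
        intro res sub hsub
        by_cases hc : sub.toList = t.take sub.toList.length
        · simp only [if_pos hc]
          have hL : 0 < sub.toList.length := by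
            have : sub ≠ "" := fun he => h (he ▸ hsub)
            exact List.length_pos_of_ne_nil (toList_ne_nil this)
          have htl : 0 < t.length := List.length_pos_of_ne_nil ht
          rw [ih (t.drop sub.toList.length) a b (by simp only [List.length_drop]; omega) (by simp only [List.length_drop]; omega) (by simp only [List.length_drop]; omega)]
        · rw [if_neg hc, if_neg hc]

-- every binding of the memo is the A-value of its suffix
def GoodM (t : List Char) (arr : List String) (memo : PySem.Dict Nat (List (List String))) : Prop :=
  ∀ j v, memo.get? j = some v → v = goA arr (t.length + 1) (t.drop j)

lemma goodM_insert (t : List Char) (arr : List String)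
    (memo : PySem.Dict Nat (List (List String))) (hg : GoodM t arr memo)
    (i : Nat) (v : List (List String)) (hv : v = goA arr (t.length + 1) (t.drop i)) :
    GoodM t arr (memo.insert i v) := by
  intro j w hw
  rw [PySem.Dict.get?_insert] at hw
  split at hw
  · cases hw; subst ‹j = i›; exact hv
  · exact hg j w hw

-- the two match tests agree for sub ∈ arr when '' ∉ arr
lemma cond_iff (arr : List String) (h : "" ∉ arr) (t' : List Char) {sub : String} (hsub : sub ∈ arr) :
    (0 < sub.toList.length ∧ PySem.Chars.startswith t' sub.toList = true)
      ↔ sub.toList = t'.take sub.toList.length := by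
  have hL : 0 < sub.toList.length := by
    have : sub ≠ "" := fun he => h (he ▸ hsub)
    exact List.length_pos_of_ne_nil (toList_ne_nil this)
  rw [PySem.Chars.startswith_iff, List.prefix_iff_eq_take]
  exact ⟨fun hx => hx.2, fun hx => ⟨hL, hx⟩⟩

-- main invariant: with enough fuel and a good memo, go(i) returns A's value on the
-- suffix starting at i and leaves the memo good
lemma goM_eq (arr : List String) (h : "" ∉ arr) (t : List Char) :
    ∀ fuel i memo, i ≤ t.length → t.length - i < fuel → GoodM t arr memo →
      (goM t arr fuel i memo).1 = goA arr (t.length + 1) (t.drop i) ∧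
      GoodM t arr (goM t arr fuel i memo).2 := by
  intro fuel
  induction fuel with
  | zero => intro i memo _ hf _; omega
  | succ f ih =>
    intro i memo hi hf hg
    by_cases hin : i = t.length
    · subst hin
      simp only [goM, if_pos]
      exact ⟨by simp [List.drop_length, goA], hg⟩
    · have hilt : i < t.length := by omega
      have hdk : t.drop i ≠ [] := by
        simp only [ne_eq, List.drop_eq_nil_iff]; omega
      cases hmem : PySem.Dict.get? memo i with
      | some v =>
        simp only [goM, if_neg hin, hmem]
        exact ⟨hg i v hmem, hg⟩
      | none =>
        simp only [goM, if_neg hin, hmem]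
        -- the inner loop over any sublist of arr
        have inner : ∀ (l : List String), (∀ s ∈ l, s ∈ arr) →
            ∀ (res : List (List String)) (m : PySem.Dict Nat (List (List String))), GoodM t arr m →
            (l.foldl (fun (acc : (List (List String)) × PySem.Dict Nat (List (List String))) sub =>
                if 0 < sub.toList.length ∧ PySem.Chars.startswith (t.drop i) sub.toList = true then
                  ((acc.1 ++ ((goM t arr f (i + sub.toList.length) acc.2).1).map (fun c => c ++ [sub]),
                    (goM t arr f (i + sub.toList.length) acc.2).2))
                else acc) (res, m)).1
              = l.foldl (fun res sub =>
                  if sub.toList = (t.drop i).take sub.toList.length then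
                    res ++ (goA arr t.length ((t.drop i).drop sub.toList.length)).map (fun c => c ++ [sub])
                  else res) res ∧
            GoodM t arr
              (l.foldl (fun (acc : (List (List String)) × PySem.Dict Nat (List (List String))) sub =>
                if 0 < sub.toList.length ∧ PySem.Chars.startswith (t.drop i) sub.toList = true then
                  ((acc.1 ++ ((goM t arr f (i + sub.toList.length) acc.2).1).map (fun c => c ++ [sub]),
                    (goM t arr f (i + sub.toList.length) acc.2).2))
                else acc) (res, m)).2 := by
          intro l
          induction l with
          | nil => intro _ res m hm; exact ⟨rfl, hm⟩
          | cons s l ihl =>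
            intro hmem' res m hm
            have hs : s ∈ arr := hmem' s (List.mem_cons_self ..)
            simp only [List.foldl_cons]
            by_cases hc : 0 < s.toList.length ∧ PySem.Chars.startswith (t.drop i) s.toList = true
            · have hcA : s.toList = (t.drop i).take s.toList.length := (cond_iff arr h (t.drop i) hs).mp hc
              have hlen : s.toList.length ≤ t.length - i := by
                have := congrArg List.length hcA
                simp only [List.length_take, List.length_drop] at this
                omega
              have hrec := ih (i + s.toList.length) m (by omega) (by omega) hm
              rw [if_pos hc, if_pos hcA]
              have hval : (goM t arr f (i + s.toList.length) m).1
                  = goA arr t.length ((t.drop i).drop s.toList.length) := by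
                rw [hrec.1, List.drop_drop]
                have harith : i + s.toList.length = s.toList.length + i := by omega
                rw [harith]
                exact (goA_fuel arr h t.length (t.drop (s.toList.length + i)) (t.length + 1) t.length
                  (by simp only [List.length_drop]; omega)
                  (by simp only [List.length_drop]; omega)
                  (by simp only [List.length_drop]; omega))
              rw [hval] at *
              exact ihl (fun x hx => hmem' x (List.mem_cons_of_mem _ hx)) _ _ hrec.2
            · have hcA : ¬ s.toList = (t.drop i).take s.toList.length :=
                fun hx => hc ((cond_iff arr h (t.drop i) hs).mpr hx)
              rw [if_neg hc, if_neg hcA]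
              exact ihl (fun x hx => hmem' x (List.mem_cons_of_mem _ hx)) res m hm
        have hA : goA arr (t.length + 1) (t.drop i)
            = arr.foldl (fun res sub =>
                if sub.toList = (t.drop i).take sub.toList.length then
                  res ++ (goA arr t.length ((t.drop i).drop sub.toList.length)).map (fun c => c ++ [sub])
                else res) [] := by
          rw [goA, if_neg hdk]
        have hinner := inner arr (fun _ hx => hx) [] memo hg
        refine ⟨by rw [hinner.1, hA], ?_⟩
        exact goodM_insert t arr _ hinner.2 i _ (by rw [hinner.1, hA])

-- ===== VERDICT (by name: the statement is the Claim_ definition above) =====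
theorem all_construct_recur_spec : Claim_equal_all_construct_recur := by
  intro target arr _ hPre
  unfold Spec_all_construct_recur all_construct_recur all_construct_recur_alt
  by_cases ht : target.toList = []
  · simp [goA, goM, ht]
  · have h : "" ∉ arr := by
      rcases hPre with h | h
      · exact absurd (by rw [h]; rfl) ht
      · exact h
    have hg : GoodM target.toList arr PySem.Dict.empty := by
      intro j v hv
      simp [PySem.Dict.get?_empty] at hv
    have := goM_eq arr h target.toList (target.toList.length + 1) 0 PySem.Dict.empty
      (by omega) (by omega) hg
    rw [this.1, List.drop_zero]
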